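-- pv_equiv track=rewrite | github.com/samarthraj/Question_Solve | Q3_150225.py | sum_of_alternate
-- ===== SOURCE A (Python) =====
-- def sum_of_alternate(n):
--     count = 0
--     even_sum = 0
--     odd_sum = 0
--     while n > 0:
--         last_numb = n % 10
--         if count % 2 == 0:
--             even_sum += last_numb
--         else:
--             odd_sum += last_numb
--
--         count += 1
--         n = n // 10
--
--     return even_sum, odd_sum
-- ===== SOURCE B (Python) =====
-- def sum_of_alternate(n):
--     # Recursive: the even-position sum is the last digit plus the odd-position
--     # sum of the remaining digits, whose even-position sum is our odd one.
--     if n <= 0: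
--         return 0, 0
--     e, o = sum_of_alternate(n // 10)
--     return n % 10 + o, e
-- ===== Notes on version B (the rewrite author's own statement) =====
-- stated objective: simpler
-- what changed: B replaces A's iterative loop with a parity counter by a recursion on the remaining digits that swaps the two sums at each digit, eliminating the counter and the parity branch entirely.
import Mathlib
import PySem

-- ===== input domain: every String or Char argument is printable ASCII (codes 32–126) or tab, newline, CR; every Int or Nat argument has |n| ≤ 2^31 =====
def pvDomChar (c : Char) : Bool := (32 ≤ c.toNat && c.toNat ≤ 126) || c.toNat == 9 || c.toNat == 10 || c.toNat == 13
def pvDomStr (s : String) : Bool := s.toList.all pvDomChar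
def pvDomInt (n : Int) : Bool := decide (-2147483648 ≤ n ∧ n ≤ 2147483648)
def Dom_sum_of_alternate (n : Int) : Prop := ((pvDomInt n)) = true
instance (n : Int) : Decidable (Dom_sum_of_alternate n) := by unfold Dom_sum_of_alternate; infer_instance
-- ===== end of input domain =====

-- B replaces A's counter-and-parity loop by a recursion on n // 10 that swaps the two sums at each digit (simpler; same cost).

-- ===== PORT A =====
-- while n > 0: last = n % 10; branch on count % 2; count += 1; n //= 10
def sumOfAlternateGo (n count even_sum odd_sum : Int) : Int × Int :=
  if h : n > 0 then
    let last_numb := PySem.Int.mod n 10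
    if PySem.Int.mod count 2 = 0 then
      sumOfAlternateGo (PySem.Int.floordiv n 10) (count + 1) (even_sum + last_numb) odd_sum
    else
      sumOfAlternateGo (PySem.Int.floordiv n 10) (count + 1) even_sum (odd_sum + last_numb)
  else
    (even_sum, odd_sum)
termination_by n.toNat
decreasing_by
  all_goals
    rw [PySem.Int.floordiv_eq_ediv_of_pos (by omega : (0:Int) < 10)]
    omega

def sum_of_alternate (n : Int) : Int × Int :=
  sumOfAlternateGo n 0 0 0

-- ===== PORT B =====
-- if n <= 0: return 0, 0;  e, o = sum_of_alternate(n // 10);  return n % 10 + o, e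
def sum_of_alternate_alt (n : Int) : Int × Int :=
  if h : n ≤ 0 then
    (0, 0)
  else
    let p := sum_of_alternate_alt (PySem.Int.floordiv n 10)
    (PySem.Int.mod n 10 + p.2, p.1)
termination_by n.toNat
decreasing_by
  rw [PySem.Int.floordiv_eq_ediv_of_pos (by omega : (0:Int) < 10)]
  omega

-- ===== PRECONDITION & SPEC =====
def Spec_sum_of_alternate (n : Int) (out : Int × Int) : Prop := out = sum_of_alternate_alt n
instance (n : Int) (out : Int × Int) : Decidable (Spec_sum_of_alternate n out) := by unfold Spec_sum_of_alternate; infer_instance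

-- ===== CLAIM (what is proved, stated in full; the proofs are below) =====
def Claim_equal_sum_of_alternate : Prop := ∀ (n : Int), Dom_sum_of_alternate n → Spec_sum_of_alternate n (sum_of_alternate n)

-- ===== LEMMAS AND PROOFS =====

-- A's accumulator loop, related to B's recursion: the accumulators are added to
-- B's pair, swapped when the counter is odd.
theorem sumOfAlternate_go_eq (k : Nat) :
    ∀ (n count even_sum odd_sum : Int), n.toNat ≤ k →
      sumOfAlternateGo n count even_sum odd_sum =
        if PySem.Int.mod count 2 = 0 then
          (even_sum + (sum_of_alternate_alt n).1, odd_sum + (sum_of_alternate_alt n).2)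
        else
          (even_sum + (sum_of_alternate_alt n).2, odd_sum + (sum_of_alternate_alt n).1) := by
  induction k with
  | zero =>
    intro n count e o hle
    have hn : ¬ n > 0 := by omega
    rw [sumOfAlternateGo, sum_of_alternate_alt]
    simp [hn, show n ≤ 0 by omega]
  | succ k ih =>
    intro n count e o hle
    rw [sumOfAlternateGo]
    by_cases hn : n > 0
    · have h10 : PySem.Int.floordiv n 10 = n / 10 :=
        PySem.Int.floordiv_eq_ediv_of_pos (by omega)
      have hrec : (PySem.Int.floordiv n 10).toNat ≤ k := by rw [h10]; omega
      have hparity : PySem.Int.mod count 2 = 0 ∨ PySem.Int.mod count 2 = 1 := by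
        rw [PySem.Int.mod_eq_emod_of_pos (by omega)]; omega
      have haltn : sum_of_alternate_alt n =
          (PySem.Int.mod n 10 + (sum_of_alternate_alt (PySem.Int.floordiv n 10)).2,
           (sum_of_alternate_alt (PySem.Int.floordiv n 10)).1) := by
        rw [sum_of_alternate_alt]
        simp [show ¬ n ≤ 0 by omega]
      rcases hparity with hc | hc
      · have hc1 : PySem.Int.mod (count + 1) 2 = 1 := by
          rw [PySem.Int.mod_eq_emod_of_pos (by omega)] at hc ⊢; omega
        rw [dif_pos hn, if_pos hc, ih _ _ _ _ hrec, if_neg (by rw [hc1]; norm_num),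
          if_pos hc, haltn]
        rw [Prod.mk.injEq]
        constructor <;> ring
      · have hc1 : PySem.Int.mod (count + 1) 2 = 0 := by
          rw [PySem.Int.mod_eq_emod_of_pos (by omega)] at hc ⊢; omega
        rw [dif_pos hn, if_neg (by rw [hc]; norm_num), ih _ _ _ _ hrec, if_pos hc1,
          if_neg (by rw [hc]; norm_num), haltn]
        rw [Prod.mk.injEq]
        constructor <;> ring
    · rw [dif_neg hn]
      rw [sum_of_alternate_alt]
      simp [show n ≤ 0 by omega]

-- ===== VERDICT (by name: the statement is the Claim_ definition above) =====
theorem sum_of_alternate_spec : Claim_equal_sum_of_alternate := by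
  intro n _
  unfold Spec_sum_of_alternate sum_of_alternate
  rw [sumOfAlternate_go_eq n.toNat n 0 0 0 le_rfl]
  norm_num [show PySem.Int.mod (0:Int) 2 = 0 by decide]
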